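-- pv_equiv track=rewrite | github.com/wschoi89/leetcode | coding_interview/ohouse/question1.py | solution
-- ===== SOURCE A (Python) =====
-- def solution(arr):
--
--     count_odd = 0
--     count_even = 0
--     result = 0
--     m = 1000000007
--
--     for value in arr:
--         if value % 2 ==0:
--             count_odd, count_even = count_odd, count_even+1
--         else:
--             count_even, count_odd = count_odd, count_even+1
--
--         result = result+count_odd
--
--     return result % m
-- ===== SOURCE B (Python) =====
-- def solution(arr):
--     # Counts subarrays with odd sum: a subarray has odd sum iff its two
--     # bounding prefix sums differ in parity, so the answer is
--     # (#even-parity prefixes) * (#odd-parity prefixes), including the empty prefix.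
--     p = 0      # parity of current prefix sum (0 or 1)
--     odd = 0    # number of nonempty prefixes with odd sum
--     for v in arr:
--         p = (p + v) % 2
--         odd += p
--     even = 1 + len(arr) - odd  # empty prefix counts as even
--     return (even * odd) % 1000000007
-- ===== Notes on version B (the rewrite author's own statement) =====
-- stated objective: simpler
-- what changed: B drops A's three-variable odd/even swap bookkeeping and instead tracks one prefix-sum parity bit and a count of odd prefixes, returning (even_prefixes * odd_prefixes) mod 1e9+7 via the identity that a subarray has odd sum iff its bounding prefix sums differ in parity.
import Mathlib
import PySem

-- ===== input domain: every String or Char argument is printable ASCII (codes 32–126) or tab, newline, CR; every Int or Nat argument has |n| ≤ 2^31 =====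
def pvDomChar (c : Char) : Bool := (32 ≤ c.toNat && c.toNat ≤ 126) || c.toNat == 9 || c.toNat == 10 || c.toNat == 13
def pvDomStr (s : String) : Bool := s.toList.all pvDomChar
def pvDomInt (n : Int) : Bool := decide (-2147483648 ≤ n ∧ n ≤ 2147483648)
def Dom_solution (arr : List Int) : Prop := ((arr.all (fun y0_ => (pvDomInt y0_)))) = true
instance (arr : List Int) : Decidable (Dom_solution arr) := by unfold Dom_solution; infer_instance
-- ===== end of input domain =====

-- B replaces A's three-variable odd/even swap bookkeeping with a prefix-sum parity bit and
-- a count of odd prefixes, returning (even_prefixes * odd_prefixes) mod 1e9+7 (simpler).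

-- ===== PORT A =====
def solution (arr : List Int) : Int :=
  let s := arr.foldl (fun (st : Int × Int × Int) value =>
    let co := st.1; let ce := st.2.1; let r := st.2.2
    if PySem.Int.mod value 2 == 0 then
      -- count_odd, count_even = count_odd, count_even+1 ; result += count_odd
      (co, ce + 1, r + co)
    else
      -- count_even, count_odd = count_odd, count_even+1 ; result += count_odd
      (ce + 1, co, r + (ce + 1))
  ) (0, 0, 0)
  PySem.Int.mod s.2.2 1000000007

-- ===== PORT B =====
def solution_alt (arr : List Int) : Int :=
  let s := arr.foldl (fun (st : Int × Int) v =>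
    (PySem.Int.mod (st.1 + v) 2, st.2 + PySem.Int.mod (st.1 + v) 2)) (0, 0)
  let even := 1 + (arr.length : Int) - s.2
  PySem.Int.mod (even * s.2) 1000000007

-- ===== PRECONDITION & SPEC =====
def Spec_solution (arr : List Int) (out : Int) : Prop := out = solution_alt arr
instance (arr : List Int) (out : Int) : Decidable (Spec_solution arr out) := by unfold Spec_solution; infer_instance

-- ===== CLAIM (what is proved, stated in full; the proofs are below) =====
def Claim_equal_solution : Prop := ∀ (arr : List Int), Dom_solution arr → Spec_solution arr (solution arr)

-- ===== LEMMAS AND PROOFS =====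

theorem pymod_two_emod (x : Int) : PySem.Int.mod x 2 = x % 2 :=
  PySem.Int.mod_eq_emod_of_pos (by norm_num)

-- Loop invariant: A's state (co, ce, r) is determined by B's state (p, o) together with a
-- ghost even-prefix count e: if p = 1 then (co, ce) = (e, o - 1) else (co, ce) = (o, e - 1),
-- and r = e * o; the even-prefix count finally equals e + (steps) - (odd increments).
theorem solution_inv (t : List Int) (co ce r p o e : Int)
    (hp : p = 0 ∨ p = 1)
    (h1 : p = 1 → co = e ∧ ce = o - 1)
    (h0 : p = 0 → co = o ∧ ce = e - 1)
    (hr : r = e * o) :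
    (t.foldl (fun (st : Int × Int × Int) value =>
      let co := st.1; let ce := st.2.1; let r := st.2.2
      if PySem.Int.mod value 2 == 0 then (co, ce + 1, r + co)
      else (ce + 1, co, r + (ce + 1))) (co, ce, r)).2.2 =
    (e + (t.length : Int) -
      ((t.foldl (fun (st : Int × Int) v =>
        (PySem.Int.mod (st.1 + v) 2, st.2 + PySem.Int.mod (st.1 + v) 2)) (p, o)).2 - o)) *
    (t.foldl (fun (st : Int × Int) v =>
        (PySem.Int.mod (st.1 + v) 2, st.2 + PySem.Int.mod (st.1 + v) 2)) (p, o)).2 := by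
  induction t generalizing co ce r p o e with
  | nil => simp [hr]
  | cons v tl ih =>
    simp only [List.foldl_cons, List.length_cons]
    rcases hp with h | h
    · -- p = 0
      subst h
      cases hv : (PySem.Int.mod v 2 == 0) with
      | true =>
        -- v even: parity stays 0, even count grows
        obtain ⟨hco, hce⟩ := h0 rfl
        have hm : PySem.Int.mod (0 + v) 2 = 0 := by
          simp only [beq_iff_eq] at hv; rw [pymod_two_emod] at hv ⊢; omega
        rw [hm]
        simp only [if_true, add_zero]
        rw [ih co (ce + 1) (r + co) 0 o (e + 1)
          (Or.inl rfl) (by simp) (fun _ => ⟨hco, by omega⟩) (by rw [hr, hco]; ring)]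
        push_cast; ring
      | false =>
        -- v odd: parity becomes 1, odd count grows
        obtain ⟨hco, hce⟩ := h0 rfl
        have hm : PySem.Int.mod (0 + v) 2 = 1 := by
          simp only [beq_eq_false_iff_ne, ne_eq] at hv
          rw [pymod_two_emod] at hv ⊢; omega
        rw [hm]
        simp only [Bool.false_eq_true, if_false]
        rw [ih (ce + 1) co (r + (ce + 1)) 1 (o + 1) e
          (Or.inr rfl) (fun _ => ⟨by omega, by omega⟩) (by omega)
          (by rw [hr]; rw [hce] at *; ring)]
        push_cast; ring
    · -- p = 1
      subst h
      cases hv : (PySem.Int.mod v 2 == 0) with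
      | true =>
        -- v even: parity stays 1, odd count grows
        obtain ⟨hco, hce⟩ := h1 rfl
        have hm : PySem.Int.mod (1 + v) 2 = 1 := by
          simp only [beq_iff_eq] at hv; rw [pymod_two_emod] at hv ⊢; omega
        rw [hm]
        simp only [if_true]
        rw [ih co (ce + 1) (r + co) 1 (o + 1) e
          (Or.inr rfl) (fun _ => ⟨hco, by omega⟩) (by simp) (by rw [hr, hco]; ring)]
        push_cast; ring
      | false =>
        -- v odd: parity becomes 0, even count grows
        obtain ⟨hco, hce⟩ := h1 rfl
        have hm : PySem.Int.mod (1 + v) 2 = 0 := by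
          simp only [beq_eq_false_iff_ne, ne_eq] at hv
          rw [pymod_two_emod] at hv ⊢; omega
        rw [hm]
        simp only [Bool.false_eq_true, if_false, add_zero]
        rw [ih (ce + 1) co (r + (ce + 1)) 0 o (e + 1)
          (Or.inl rfl) (by omega) (fun _ => ⟨by omega, by omega⟩)
          (by rw [hr]; rw [hce] at *; ring)]
        push_cast; ring

-- ===== VERDICT (by name: the statement is the Claim_ definition above) =====
theorem solution_spec : Claim_equal_solution := by
  intro arr _
  unfold Spec_solution solution solution_alt
  simp only []
  rw [solution_inv arr 0 0 0 0 0 1 (Or.inl rfl) (by omega) (fun _ => ⟨rfl, rfl⟩) (by ring)]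
  ring_nf
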